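-- pv_equiv track=rewrite | github.com/Sarthak251099/Cardination-final | CARDAINATION-UPDATED/cardination/main/utils.py | checkMaxOccurence
-- ===== SOURCE A (Python) =====
-- def checkMaxOccurence(wordset,message):
--     count = 0
--     message_arr = message.split(" ")
--     wordset_arr = wordset[0].split(".")
--     for i in range(len(message_arr)):
--         search_list = wordset_arr.count(message_arr[i].lower())
--         count = count + search_list
--     return count
-- ===== SOURCE B (Python) =====
-- def checkMaxOccurence(wordset, message):
--     mc = {}
--     for w in message.split(" "):
--         lw = w.lower()
--         mc[lw] = mc.get(lw, 0) + 1
--     return sum(mc.get(w, 0) for w in wordset[0].split("."))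
-- ===== Notes on version B (the rewrite author's own statement) =====
-- stated objective: alternative
-- what changed: Replaces A's nested scan (for each message word, a full count pass over the wordset words) by one pass building a frequency table of lowercased message words and a single lookup-sum over the wordset words.
import Mathlib
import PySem

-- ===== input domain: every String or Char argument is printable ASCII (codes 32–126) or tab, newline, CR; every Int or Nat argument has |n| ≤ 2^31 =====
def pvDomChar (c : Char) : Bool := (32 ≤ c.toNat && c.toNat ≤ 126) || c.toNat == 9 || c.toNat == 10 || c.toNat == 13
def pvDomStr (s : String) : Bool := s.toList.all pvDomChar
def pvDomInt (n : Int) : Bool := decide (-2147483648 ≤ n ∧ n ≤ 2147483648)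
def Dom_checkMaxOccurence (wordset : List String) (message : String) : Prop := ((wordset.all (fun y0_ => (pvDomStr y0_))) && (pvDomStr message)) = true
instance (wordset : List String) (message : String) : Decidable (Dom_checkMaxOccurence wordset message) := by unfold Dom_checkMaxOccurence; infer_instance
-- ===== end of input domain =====

-- B replaces A's nested message-word × wordset-word scan by a frequency table built in one
-- pass over the message words plus a single lookup-sum over the wordset words.
-- Equivalence of RETURN values is claimed on Pre_ (wordset nonempty).

-- ===== PORT A =====
def checkMaxOccurence (wordset : List String) (message : String) : Int :=
  let message_arr := (PySem.Str.split? message " ").getD []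
  match PySem.List.pyGet? wordset 0 with
  | none => 0  -- Python raises IndexError here; excluded by Pre_
  | some w0 =>
    let wordset_arr := (PySem.Str.split? w0 ".").getD []
    (PySem.List.pyRange 0 (message_arr.length : Int) 1).foldl
      (fun count i =>
        count + (PySem.List.count wordset_arr (PySem.Str.lower (PySem.List.pyGetD message_arr i "")) : Int)) 0

-- ===== PORT B =====
def checkMaxOccurence_alt (wordset : List String) (message : String) : Int :=
  let mc : PySem.Dict String Int :=
    ((PySem.Str.split? message " ").getD []).foldl
      (fun d w => let lw := PySem.Str.lower w; d.insert lw (d.getD lw 0 + 1)) PySem.Dict.empty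
  match PySem.List.pyGet? wordset 0 with
  | none => 0  -- Python raises IndexError here; excluded by Pre_
  | some w0 =>
    (((PySem.Str.split? w0 ".").getD []).map (fun w => mc.getD w 0)).sum

-- ===== PRECONDITION & SPEC =====
-- A evaluates wordset[0]: it raises IndexError on an empty wordset list, so Pre_ requires it nonempty.
def Pre_checkMaxOccurence (wordset : List String) (message : String) : Prop := wordset ≠ []
instance (wordset : List String) (message : String) : Decidable (Pre_checkMaxOccurence wordset message) := by unfold Pre_checkMaxOccurence; infer_instance
def pvWitness_checkMaxOccurence : List String × String := (["hi.there.hi"], "Hi there")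

def Spec_checkMaxOccurence (wordset : List String) (message : String) (out : Int) : Prop := out = checkMaxOccurence_alt wordset message
instance (wordset : List String) (message : String) (out : Int) : Decidable (Spec_checkMaxOccurence wordset message out) := by unfold Spec_checkMaxOccurence; infer_instance

-- ===== CLAIM (what is proved, stated in full; the proofs are below) =====
def Claim_equal_checkMaxOccurence : Prop := ∀ (wordset : List String) (message : String), Dom_checkMaxOccurence wordset message → Pre_checkMaxOccurence wordset message → Spec_checkMaxOccurence wordset message (checkMaxOccurence wordset message)

-- ===== LEMMAS AND PROOFS =====

-- double-counting: summing, over the message words, each word's count in the wordset equals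
-- summing, over the wordset words, each word's count in the message
lemma swap_count (ws ms : List String) :
    (ms.map (fun m => (List.count m ws : Int))).sum
      = (ws.map (fun w => (List.count w ms : Int))).sum := by
  induction ms with
  | nil => simp
  | cons m ms ih =>
    simp only [List.map_cons, List.sum_cons, ih, List.count_cons]
    push_cast
    rw [PySem.List.sum_map_add_int]
    have h1 : (List.map (fun w => (if m == w then (1:Int) else 0)) ws).sum = (List.count m ws : Int) := by
      rw [PySem.List.sum_map_ite_one_zero (fun w => m == w) ws]
      norm_cast
      rw [List.count_eq_countP']
      apply List.countP_congr
      intro x _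
      constructor <;> (intro h; exact (beq_iff_eq.mpr (beq_iff_eq.mp h).symm))
    rw [h1]; ring

theorem checkMaxOccurence_spec : Claim_equal_checkMaxOccurence := by
  intro wordset message _ hpre
  obtain ⟨w0, rest, rfl⟩ : ∃ w0 rest, wordset = w0 :: rest := by
    cases wordset with
    | nil => exact absurd rfl hpre
    | cons a l => exact ⟨a, l, rfl⟩
  unfold Spec_checkMaxOccurence checkMaxOccurence checkMaxOccurence_alt
  simp only [PySem.List.pyGet?, PySem.List.pyIdx?]
  norm_num
  rw [PySem.List.foldl_pyRange_pyGetD' _ ""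
      (f := fun acc w => acc + (List.count (PySem.Str.lower w) ((PySem.Str.split? w0 ".").getD []) : Int))
      (init := (0:Int)) (le_refl 0)]
  rw [Int.toNat_zero, List.drop_zero, PySem.List.foldl_add]
  rw [zero_add]
  rw [show (fun (d : PySem.Dict String Int) (w : String) =>
        let lw := PySem.Str.lower w; d.insert lw (d.getD lw 0 + 1))
      = (fun d w => d.insert (PySem.Str.lower w) (d.getD (PySem.Str.lower w) 0 + 1)) from rfl]
  rw [← List.foldl_map (f := PySem.Str.lower) (g := fun (d : PySem.Dict String Int) x => d.insert x (d.getD x 0 + 1))]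
  rw [PySem.Dict.foldl_insert_getD_add_one_eq_counter]
  simp only [PySem.Dict.getD_counter]
  have h2 := swap_count ((PySem.Str.split? w0 ".").getD [])
    ((((PySem.Str.split? message " ").getD []).map PySem.Str.lower))
  rw [List.map_map] at h2
  simpa [Function.comp] using h2
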